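-- pv_equiv track=rewrite | github.com/AJ1070847/Kata_foo_bar_qix_python | FooBarQix.py | foor_bar_resultat_final
-- ===== SOURCE A (Python) =====
-- def foobar_verifer_divisble(exemple):
--     resultat =""
--
--     if int(exemple) % 3 == 0:
--         resultat= resultat + "Foo"
--     if int(exemple) % 5 == 0 :
--         resultat=resultat+"Bar"
--     if int(exemple) % 7 == 0 :
--         resultat=resultat+ "Qix"
--     return resultat
--
-- def foobar_verifier_changement(exemple):
--     boole=False
--     if foobar_verifer_divisble(exemple)!="" :
--         boole = True
--     decouper_nombre = [int(a) for a in str(exemple)]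
--     for a in decouper_nombre :
--         if (a == 3) or (a == 5) or (a == 7) :
--             boole= True
--
--     return boole
--
-- def foo_bar_verifier_presence(exemple) :
--
--     decouper_nombre = [int(a) for a in str(exemple)]
--     resultat_2=""
--     for a in decouper_nombre :
--
--         if a == 3:
--             a= "Foo"
--             resultat_2=resultat_2 + str(a)
--
--
--         elif a == 5:
--             a=  "Bar"
--             resultat_2=resultat_2 + str(a)
--
--
--         elif a == 7:
--             a =  "Qix"
--             resultat_2=resultat_2 + str(a)
--         elif a == 0 :
--             a= "*"
--             resultat_2=resultat_2 + str(a)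
--
--     return (resultat_2)
--
-- def foor_bar_resultat_final(exemple) :
--     resultat_final=""
--     if foobar_verifier_changement(exemple)==False:
--         decouper_nombre = [int(a) for a in str(exemple)]
--         for a in decouper_nombre :
--             if a == 0 :
--                 a =  "*"
--             resultat_final=resultat_final + str(a)
--         return resultat_final
--     else :
--         return (foobar_verifer_divisble(exemple) + foo_bar_verifier_presence(exemple) )
-- ===== SOURCE B (Python) =====
-- def foor_bar_resultat_final(exemple):
--     prefix = ""
--     if int(exemple) % 3 == 0:
--         prefix += "Foo"
--     if int(exemple) % 5 == 0:
--         prefix += "Bar"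
--     if int(exemple) % 7 == 0:
--         prefix += "Qix"
--     has_special = False
--     presence = ""
--     plain = ""
--     for ch in str(exemple):
--         d = int(ch)
--         if d == 3 or d == 5 or d == 7:
--             has_special = True
--         if d == 3:
--             presence += "Foo"
--         elif d == 5:
--             presence += "Bar"
--         elif d == 7:
--             presence += "Qix"
--         elif d == 0:
--             presence += "*"
--         plain += "*" if d == 0 else str(d)
--     if not has_special and prefix == "":
--         return plain
--     return prefix + presence
-- ===== Notes on version B (the rewrite author's own statement) =====
-- stated objective: alternative
-- what changed: B fuses A's four separate traversals (divisibility helper called twice, the changement scan and the presence scan, plus the plain-digit loop) into one pass over the digit characters that simultaneously tracks has_special and builds the presence and plain buffers, choosing the output from the directly computed divisibility prefix.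
import Mathlib
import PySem

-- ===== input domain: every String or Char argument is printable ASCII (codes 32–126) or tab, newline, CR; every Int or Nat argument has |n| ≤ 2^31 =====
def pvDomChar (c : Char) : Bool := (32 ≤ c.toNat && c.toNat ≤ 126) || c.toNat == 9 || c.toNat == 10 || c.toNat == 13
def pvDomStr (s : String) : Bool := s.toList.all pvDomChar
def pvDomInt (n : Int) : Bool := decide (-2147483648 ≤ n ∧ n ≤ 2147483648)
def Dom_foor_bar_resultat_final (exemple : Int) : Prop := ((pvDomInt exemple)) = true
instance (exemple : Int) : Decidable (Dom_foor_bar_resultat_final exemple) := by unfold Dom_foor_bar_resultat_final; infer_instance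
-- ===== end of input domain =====

-- B makes ONE pass over the digit characters instead of A's four separate helper scans; return value only, no side effects.

-- ===== PORT A =====
-- int(a) on a single character string (a digit under Pre_); getD 0 is unreachable inside Pre_
def pvDigitA (c : Char) : Int := (PySem.Int.ofChars? [c]).getD 0

def foobar_verifer_divisble (exemple : Int) : String :=
  let resultat := ""
  let resultat := if PySem.Int.mod exemple 3 == 0 then resultat ++ "Foo" else resultat
  let resultat := if PySem.Int.mod exemple 5 == 0 then resultat ++ "Bar" else resultat
  let resultat := if PySem.Int.mod exemple 7 == 0 then resultat ++ "Qix" else resultat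
  resultat

def foobar_verifier_changement (exemple : Int) : Bool :=
  let boole := false
  let boole := if foobar_verifer_divisble exemple != "" then true else boole
  let decouper_nombre := (PySem.Int.toChars exemple).map pvDigitA
  decouper_nombre.foldl (fun boole a =>
    if a == 3 || a == 5 || a == 7 then true else boole) boole

def foo_bar_verifier_presence (exemple : Int) : String :=
  let decouper_nombre := (PySem.Int.toChars exemple).map pvDigitA
  decouper_nombre.foldl (fun resultat_2 a =>
    if a == 3 then resultat_2 ++ "Foo"
    else if a == 5 then resultat_2 ++ "Bar"
    else if a == 7 then resultat_2 ++ "Qix"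
    else if a == 0 then resultat_2 ++ "*"
    else resultat_2) ""

def foor_bar_resultat_final (exemple : Int) : String :=
  if foobar_verifier_changement exemple == false then
    let decouper_nombre := (PySem.Int.toChars exemple).map pvDigitA
    decouper_nombre.foldl (fun resultat_final a =>
      resultat_final ++ (if a == 0 then "*" else PySem.Int.toStr a)) ""
  else
    foobar_verifer_divisble exemple ++ foo_bar_verifier_presence exemple

-- ===== PORT B =====
-- single pass: state = (has_special, presence, plain)
def pvStepB (st : Bool × String × String) (c : Char) : Bool × String × String :=
  let d := pvDigitA c  -- int(ch), same primitive as A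
  let hs := if d == 3 || d == 5 || d == 7 then true else st.1
  let pres :=
    if d == 3 then st.2.1 ++ "Foo"
    else if d == 5 then st.2.1 ++ "Bar"
    else if d == 7 then st.2.1 ++ "Qix"
    else if d == 0 then st.2.1 ++ "*"
    else st.2.1
  let pl := st.2.2 ++ (if d == 0 then "*" else PySem.Int.toStr d)
  (hs, pres, pl)

def foor_bar_resultat_final_alt (exemple : Int) : String :=
  let pref :=
    (if PySem.Int.mod exemple 3 == 0 then "Foo" else "")
    ++ (if PySem.Int.mod exemple 5 == 0 then "Bar" else "")
    ++ (if PySem.Int.mod exemple 7 == 0 then "Qix" else "")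
  let st := (PySem.Int.toChars exemple).foldl pvStepB (false, "", "")
  if !st.1 && pref == "" then st.2.2 else pref ++ st.2.1

-- ===== PRECONDITION & SPEC =====
-- Pre_ excludes negative inputs: on those str(exemple) contains '-' and both A and B raise ValueError at int('-').
def Pre_foor_bar_resultat_final (exemple : Int) : Prop := 0 ≤ exemple
instance (exemple : Int) : Decidable (Pre_foor_bar_resultat_final exemple) := by unfold Pre_foor_bar_resultat_final; infer_instance
def pvWitness_foor_bar_resultat_final : Int := (21)

def Spec_foor_bar_resultat_final (exemple : Int) (out : String) : Prop := out = foor_bar_resultat_final_alt exemple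
instance (exemple : Int) (out : String) : Decidable (Spec_foor_bar_resultat_final exemple out) := by unfold Spec_foor_bar_resultat_final; infer_instance

-- ===== CLAIM (what is proved, stated in full; the proofs are below) =====
def Claim_equal_foor_bar_resultat_final : Prop := ∀ (exemple : Int), Dom_foor_bar_resultat_final exemple → Pre_foor_bar_resultat_final exemple → Spec_foor_bar_resultat_final exemple (foor_bar_resultat_final exemple)

-- ===== LEMMAS AND PROOFS =====

-- the B fold computes exactly A's three separate folds
theorem pvFold_eq (cs : List Char) (b : Bool) (p q : String) :
    cs.foldl pvStepB (b, p, q) =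
      ((cs.map pvDigitA).foldl (fun boole a => if a == 3 || a == 5 || a == 7 then true else boole) b,
       (cs.map pvDigitA).foldl (fun r a =>
         if a == 3 then r ++ "Foo" else if a == 5 then r ++ "Bar"
         else if a == 7 then r ++ "Qix" else if a == 0 then r ++ "*" else r) p,
       (cs.map pvDigitA).foldl (fun r a => r ++ (if a == 0 then "*" else PySem.Int.toStr a)) q) := by
  induction cs generalizing b p q with
  | nil => rfl
  | cons c cs ih =>
    simp only [List.map_cons, List.foldl_cons, pvStepB, pvDigitA]
    rw [ih]

theorem pvChangeFold_or (ds : List Int) (b : Bool) :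
    ds.foldl (fun boole a => if a == 3 || a == 5 || a == 7 then true else boole) b
      = (b || ds.foldl (fun boole a => if a == 3 || a == 5 || a == 7 then true else boole) false) := by
  induction ds generalizing b with
  | nil => simp
  | cons d ds ih =>
    simp only [List.foldl_cons]
    rw [ih (if (d == 3 || d == 5 || d == 7) = true then true else b),
       ih (if (d == 3 || d == 5 || d == 7) = true then true else false)]
    by_cases h : (d == 3 || d == 5 || d == 7) = true <;> simp [h]

theorem foor_bar_resultat_final_spec : Claim_equal_foor_bar_resultat_final := by
  intro exemple _ _
  unfold Spec_foor_bar_resultat_final foor_bar_resultat_final foor_bar_resultat_final_alt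
  rw [pvFold_eq]
  unfold foobar_verifier_changement
  rw [pvChangeFold_or]
  simp only
  have hpre : foobar_verifer_divisble exemple =
      (if PySem.Int.mod exemple 3 == 0 then "Foo" else "")
      ++ (if PySem.Int.mod exemple 5 == 0 then "Bar" else "")
      ++ (if PySem.Int.mod exemple 7 == 0 then "Qix" else "") := by
    unfold foobar_verifer_divisble
    split_ifs <;> simp_all
  rw [hpre] at *
  set P := (if PySem.Int.mod exemple 3 == 0 then "Foo" else "")
      ++ (if PySem.Int.mod exemple 5 == 0 then "Bar" else "")
      ++ (if PySem.Int.mod exemple 7 == 0 then "Qix" else "") with hP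
  set sb := ((PySem.Int.toChars exemple).map pvDigitA).foldl
      (fun boole a => if a == 3 || a == 5 || a == 7 then true else boole) false with hsb
  by_cases hp : P = "" <;> by_cases hb : sb = true <;>
    simp [foo_bar_verifier_presence, hp, hb]

-- ===== VERDICT (by name: the statement is the Claim_ definition above) =====
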